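-- pv_equiv track=rewrite | github.com/LuisaK03/CoT_explainability | perfromance.py | extract_yes_no
-- ===== SOURCE A (Python) =====
-- def extract_yes_no(strings):
--     """
--     Extracts the last occurrence of 'yes' or 'no' in each string of the input list.
--     The function is case-insensitive.
--
--     :param strings: List of strings to process.
--     :return: List of 'yes' or 'no' corresponding to each string.
--     """
--     results = []
--     for string in strings:
--         # Find the last occurrence of 'yes' or 'no', case-insensitive
--         last_yes = string.lower().rfind('yes')
--         last_no = string.lower().rfind('no')
--
--         if last_yes == -1 and last_no == -1:
--             # Neither 'yes' nor 'no' found in the string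
--             results.append(None)
--         elif last_yes > last_no:
--             # 'yes' is the last occurrence
--             results.append('yes')
--         else:
--             # 'no' is the last occurrence or both are not found
--             results.append('no')
--
--     return results
-- ===== SOURCE B (Python) =====
-- def extract_yes_no(strings):
--     results = []
--     for string in strings:
--         s = string.lower()
--         last = None
--         # single left-to-right pass remembering the most recent match
--         for i in range(len(s)):
--             if s.startswith('yes', i):
--                 last = 'yes'
--             elif s.startswith('no', i):
--                 last = 'no'
--         results.append(last)
--     return results
-- ===== Notes on version B (the rewrite author's own statement) =====
-- stated objective: alternative
-- what changed: Replaced the two independent right-to-left rfind scans plus position comparison by a single left-to-right pass per string that remembers the most recent 'yes'/'no' match.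
import Mathlib
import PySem

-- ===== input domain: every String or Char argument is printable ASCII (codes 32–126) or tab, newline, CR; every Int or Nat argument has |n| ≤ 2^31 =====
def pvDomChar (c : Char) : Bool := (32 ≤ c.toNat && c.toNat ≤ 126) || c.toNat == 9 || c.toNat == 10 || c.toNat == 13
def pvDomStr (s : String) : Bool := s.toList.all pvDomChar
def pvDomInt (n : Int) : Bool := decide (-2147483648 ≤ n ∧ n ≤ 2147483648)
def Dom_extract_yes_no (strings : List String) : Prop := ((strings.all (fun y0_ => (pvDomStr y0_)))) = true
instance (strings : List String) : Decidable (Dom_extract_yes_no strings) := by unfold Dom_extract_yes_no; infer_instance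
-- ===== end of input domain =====

-- B re-implements A by one left-to-right pass per string that remembers the most recent match,
-- instead of two rfind scans compared by position; same cost, different algorithm.

-- ===== PORT A =====
def extract_yes_no (strings : List String) : List (Option String) :=
  strings.foldl (fun results string =>
    let last_yes := PySem.Str.rfind (PySem.Str.lower string) "yes"
    let last_no := PySem.Str.rfind (PySem.Str.lower string) "no"
    results ++ [if last_yes = -1 ∧ last_no = -1 then none
                else if last_yes > last_no then some "yes" else some "no"]) []

-- ===== PORT B =====
-- B's inner 'for i in range(len(s))' loop with s.startswith(sub, i), as structural recursion on
-- the suffix s.drop i (s.startswith(sub, i) is exactly sub.isPrefixOf (s.drop i)).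
def scanYN : List Char → Option String → Option String
  | [], last => last
  | c :: rest, last =>
      scanYN rest
        (if PySem.Chars.startswith (c :: rest) ['y','e','s'] then some "yes"
         else if PySem.Chars.startswith (c :: rest) ['n','o'] then some "no" else last)

def extract_yes_no_alt (strings : List String) : List (Option String) :=
  strings.foldl (fun results string =>
    results ++ [scanYN (PySem.Str.lower string).toList none]) []

-- ===== PRECONDITION & SPEC =====
def Spec_extract_yes_no (strings : List String) (out : List (Option String)) : Prop := out = extract_yes_no_alt strings
instance (strings : List String) (out : List (Option String)) : Decidable (Spec_extract_yes_no strings out) := by unfold Spec_extract_yes_no; infer_instance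

-- ===== CLAIM (what is proved, stated in full; the proofs are below) =====
def Claim_equal_extract_yes_no : Prop := ∀ (strings : List String), Dom_extract_yes_no strings → Spec_extract_yes_no strings (extract_yes_no strings)

-- ===== LEMMAS AND PROOFS =====

theorem go_neg_one_le (sub s : List Char) (k : Nat) : -1 ≤ PySem.Chars.rfind.go s sub k := by
  induction k with
  | zero => simp [PySem.Chars.rfind.go]; split <;> omega
  | succ j ih =>
      rw [show PySem.Chars.rfind.go s sub (j+1) =
        if sub.isPrefixOf (s.drop (j+1)) then ((j:Int)+1) else PySem.Chars.rfind.go s sub j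
        from by simp [PySem.Chars.rfind.go]]
      split <;> omega

theorem go_cons (sub : List Char) (c : Char) (cs : List Char) (k : Nat) :
    PySem.Chars.rfind.go (c :: cs) sub (k+1) =
      if PySem.Chars.rfind.go cs sub k = -1 then (if sub.isPrefixOf (c :: cs) then 0 else -1)
      else PySem.Chars.rfind.go cs sub k + 1 := by
  induction k with
  | zero =>
      rw [show PySem.Chars.rfind.go (c :: cs) sub 1 =
        if sub.isPrefixOf ((c :: cs).drop 1) then (1:Int) else PySem.Chars.rfind.go (c :: cs) sub 0
        from by simpa using (by simp [PySem.Chars.rfind.go] :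
          PySem.Chars.rfind.go (c :: cs) sub (0+1) = _)]
      simp [PySem.Chars.rfind.go]
      split_ifs <;> try simp_all
  | succ j ih =>
      rw [show PySem.Chars.rfind.go (c :: cs) sub (j+1+1) =
        if sub.isPrefixOf ((c :: cs).drop (j+1+1)) then ((j:Int)+1+1) else PySem.Chars.rfind.go (c :: cs) sub (j+1)
        from by simp [PySem.Chars.rfind.go]; try ring_nf]
      rw [show PySem.Chars.rfind.go cs sub (j+1) =
        if sub.isPrefixOf (cs.drop (j+1)) then ((j:Int)+1) else PySem.Chars.rfind.go cs sub j
        from by simp [PySem.Chars.rfind.go]]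
      have hge := go_neg_one_le sub cs j
      simp only [List.drop_succ_cons]
      split_ifs with h1 h2 h3 <;> simp_all; omega

theorem rfind_cons (sub : List Char) (c : Char) (cs : List Char) :
    PySem.Chars.rfind (c :: cs) sub =
      if PySem.Chars.rfind cs sub = -1 then (if sub.isPrefixOf (c :: cs) then 0 else -1)
      else PySem.Chars.rfind cs sub + 1 := by
  simp only [PySem.Chars.rfind, List.length_cons]
  exact go_cons sub c cs cs.length

theorem rfind_neg_one_le (s sub : List Char) : -1 ≤ PySem.Chars.rfind s sub :=
  go_neg_one_le sub s s.length


theorem key_arith (a b : Int) (ha : -1 ≤ a) (hb : -1 ≤ b) (py pn : Bool) (hpp : ¬(py = true ∧ pn = true)) (last : Option String) :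
    (if a = -1 ∧ b = -1 then (if py then some "yes" else if pn then some "no" else last)
     else if a > b then some "yes" else some "no")
    =
    (if (if a = -1 then (if py then (0:Int) else -1) else a+1) = -1 ∧
        (if b = -1 then (if pn then (0:Int) else -1) else b+1) = -1
       then last
     else if (if a = -1 then (if py then (0:Int) else -1) else a+1) >
             (if b = -1 then (if pn then (0:Int) else -1) else b+1)
       then some "yes" else some "no") := by
  cases py <;> cases pn <;> simp_all <;> split_ifs <;> first | rfl | omega | (simp_all; try omega)

theorem scan_eq (cs : List Char) (last : Option String) :
    scanYN cs last =
      if PySem.Chars.rfind cs ['y','e','s'] = -1 ∧ PySem.Chars.rfind cs ['n','o'] = -1 then last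
      else if PySem.Chars.rfind cs ['y','e','s'] > PySem.Chars.rfind cs ['n','o'] then some "yes"
      else some "no" := by
  induction cs generalizing last with
  | nil => simp [scanYN, PySem.Chars.rfind, PySem.Chars.rfind.go, List.isPrefixOf]
  | cons c rest ih =>
      rw [scanYN, ih]
      rw [rfind_cons ['y','e','s'] c rest, rfind_cons ['n','o'] c rest]
      have hpp : ¬(List.isPrefixOf ['y','e','s'] (c :: rest) = true ∧
                   List.isPrefixOf ['n','o'] (c :: rest) = true) := by
        rintro ⟨h1, h2⟩
        simp at h1 h2
        exact absurd (h1.1.trans h2.1.symm) (by decide)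
      simpa [PySem.Chars.startswith] using
        key_arith (PySem.Chars.rfind rest ['y','e','s']) (PySem.Chars.rfind rest ['n','o'])
          (rfind_neg_one_le rest ['y','e','s']) (rfind_neg_one_le rest ['n','o'])
          (List.isPrefixOf ['y','e','s'] (c :: rest)) (List.isPrefixOf ['n','o'] (c :: rest)) hpp last

theorem foldl_snoc_eq {α β : Type} (f g : α → β) (h : ∀ x, f x = g x) (l : List α) (acc : List β) :
    l.foldl (fun r x => r ++ [f x]) acc = l.foldl (fun r x => r ++ [g x]) acc := by
  induction l generalizing acc with
  | nil => rfl
  | cons x xs ih => simp only [List.foldl_cons, h x]; exact ih _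

theorem per_string (s : String) :
    (if PySem.Str.rfind (PySem.Str.lower s) "yes" = -1 ∧ PySem.Str.rfind (PySem.Str.lower s) "no" = -1
       then (none : Option String)
     else if PySem.Str.rfind (PySem.Str.lower s) "yes" > PySem.Str.rfind (PySem.Str.lower s) "no"
       then some "yes" else some "no")
    = scanYN (PySem.Str.lower s).toList none := by
  rw [scan_eq]
  simp [PySem.Str.rfind_eq]

theorem extract_yes_no_spec : Claim_equal_extract_yes_no := by
  intro strings _
  unfold Spec_extract_yes_no extract_yes_no extract_yes_no_alt
  exact foldl_snoc_eq _ _ per_string strings []
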